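-- pv_equiv track=rewrite | github.com/izodam/Algorithm | 백준/Gold/17140. 이차원 배열과 연산/이차원 배열과 연산.py | cal_sort
-- ===== SOURCE A (Python) =====
-- def cal_sort(board):
--     new_board = []
--     max_length = 0
--     for row in board:
--         row_dict = dict()
--         for i in row:
--             if i == 0:
--                 continue
--             if i in row_dict:
--                 row_dict[i] += 1
--             else:
--                 row_dict[i] = 1
--         sorted_row = sorted(row_dict.items(), key=lambda x: (x[1], x[0]))
--         new_row = []
--         for x, y in sorted_row:
--             new_row.append(x)
--             new_row.append(y)
--         new_board.append(new_row)
--         max_length = max(max_length, len(new_row))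
--
--     for row in range(len(new_board)):
--         if len(new_board[row]) != max_length:
--             new_board[row] += [0] * (max_length - len(new_board[row]))
--         if len(new_board[row]) > 100:
--             new_board[row] = new_board[row][:100]
--
--     return new_board
-- ===== SOURCE B (Python) =====
-- def cal_sort(board):
--     rows = []
--     for row in board:
--         cnt = {}
--         for v in row:
--             if v != 0:
--                 cnt[v] = cnt.get(v, 0) + 1
--         new_row = []
--         for c in sorted(set(cnt.values())):
--             for v in sorted(cnt):
--                 if cnt[v] == c:
--                     new_row += [v, c]
--         rows.append(new_row)
--     m = max(map(len, rows), default=0)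
--     return [(r + [0] * (m - len(r)))[:100] for r in rows]
-- ===== Notes on version B (the rewrite author's own statement) =====
-- stated objective: alternative
-- what changed: Replaces A's sorted(items, key=(count,value)) comparison sort and flatten with a counting-sort style emission: iterate the distinct counts in ascending order and, within each count, the distinct values in ascending order, appending matching (value,count) pairs; the running max is replaced by a max-with-default over the finished rows and the pad/truncate branch pair by a single pad-then-take-100 expression.
import Mathlib
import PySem

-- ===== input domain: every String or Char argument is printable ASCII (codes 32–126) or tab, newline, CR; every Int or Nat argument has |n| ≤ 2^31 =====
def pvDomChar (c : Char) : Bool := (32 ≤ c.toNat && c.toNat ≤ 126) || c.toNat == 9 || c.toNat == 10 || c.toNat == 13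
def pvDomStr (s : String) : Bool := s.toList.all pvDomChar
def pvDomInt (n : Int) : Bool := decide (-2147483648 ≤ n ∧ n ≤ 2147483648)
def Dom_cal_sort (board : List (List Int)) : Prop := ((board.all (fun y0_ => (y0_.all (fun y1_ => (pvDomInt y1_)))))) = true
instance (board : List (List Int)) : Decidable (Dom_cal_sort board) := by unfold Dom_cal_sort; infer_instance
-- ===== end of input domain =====

-- B replaces A's sorted(items, key=(count,value)) by a counting-sort style double loop (distinct counts
-- ascending, values ascending, emit matching pairs); same results, different decomposition (objective: alternative).

-- ===== PORT A =====
-- A-side helper: the body of A's main loop (count nonzero entries, sort by (count, value), flatten pairs)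
def calRowA (row : List Int) : List Int :=
  let rowDict := row.foldl (fun d i =>
    if i = 0 then d
    else if d.contains i then d.modify i 0 (· + 1)
    else d.insert i 1) PySem.Dict.empty
  let sortedRow := PySem.List.sorted2 rowDict.items (fun x => x.2) (fun x => x.1)
  sortedRow.foldl (fun acc xy => acc ++ [xy.1, xy.2]) []

def cal_sort (board : List (List Int)) : List (List Int) :=
  let st := board.foldl (fun (st : List (List Int) × Int) row =>
    let newRow := calRowA row
    (st.1 ++ [newRow], max st.2 (PySem.List.len newRow))) ([], 0)
  -- the index loop 'for row in range(len(new_board))' rewrites each row independently: ported as a map over the rows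
  st.1.map (fun r =>
    let r1 := if PySem.List.len r ≠ st.2 then r ++ List.replicate (st.2 - PySem.List.len r).toNat 0 else r
    if PySem.List.len r1 > 100 then PySem.List.slice r1 none (some 100) else r1)

-- ===== PORT B =====
-- B-side helper: the body of B's main loop (count nonzero entries, emit pairs by count buckets ascending)
def calRowB (row : List Int) : List Int :=
  let cnt := row.foldl (fun d v => if v ≠ 0 then d.insert v (d.getD v 0 + 1) else d) PySem.Dict.empty
  (PySem.List.sorted (PySem.Set.ofList cnt.values) (fun x => x)).foldl (fun acc c =>
    (PySem.List.sorted cnt.keys (fun x => x)).foldl (fun acc2 v =>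
      if cnt.getD v 0 = c then acc2 ++ [v, c] else acc2) acc) []

def cal_sort_alt (board : List (List Int)) : List (List Int) :=
  let rows := board.map calRowB
  let m := PySem.List.maxD (rows.map PySem.List.len) (fun x => x) 0
  rows.map (fun r => PySem.List.slice (r ++ List.replicate (m - PySem.List.len r).toNat 0) none (some 100))

-- ===== PRECONDITION & SPEC =====
def Spec_cal_sort (board : List (List Int)) (out : List (List Int)) : Prop := out = cal_sort_alt board
instance (board : List (List Int)) (out : List (List Int)) : Decidable (Spec_cal_sort board out) := by unfold Spec_cal_sort; infer_instance

-- ===== CLAIM (what is proved, stated in full; the proofs are below) =====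
def Claim_equal_cal_sort : Prop := ∀ (board : List (List Int)), Dom_cal_sort board → Spec_cal_sort board (cal_sort board)

-- ===== LEMMAS AND PROOFS =====

-- sorted2 with two Int keys is sorted with the lexicographic key
theorem pv_sorted2_eq_sorted_lex {α : Type} (xs : List α) (k1 k2 : α → Int) :
    PySem.List.sorted2 xs k1 k2 = PySem.List.sorted xs (fun x => toLex (k1 x, k2 x)) := by
  have hb : (fun a b : α => (decide (k1 a < k1 b) || (!decide (k1 b < k1 a) && decide (k2 a < k2 b))))
      = (fun a b : α => decide ((fun x => toLex (k1 x, k2 x)) a < (fun x => toLex (k1 x, k2 x)) b)) := by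
    funext a b
    apply Bool.eq_iff_iff.mpr
    simp only [Bool.or_eq_true, Bool.and_eq_true, Bool.not_eq_true', decide_eq_true_eq,
      decide_eq_false_iff_not, Prod.Lex.lt_iff, ofLex_toLex]
    omega
  simp only [PySem.List.sorted2, PySem.List.sorted, if_neg (by decide : ¬ (false = true))]
  rw [hb]

-- A's counting loop builds the counter of the nonzero entries
theorem pv_dictA_eq_counter (row : List Int) :
    row.foldl (fun d i =>
      if i = 0 then d
      else if d.contains i then d.modify i 0 (· + 1)
      else d.insert i 1) PySem.Dict.empty
    = PySem.Dict.counter (row.filter (fun v => decide (v ≠ 0))) := by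
  rw [← PySem.Dict.foldl_insert_getD_add_one_eq_counter, List.foldl_filter]
  symm
  apply PySem.List.foldl_congr_mem
  intro d i _
  by_cases h : i = 0
  · simp [h]
  · rw [if_pos (by simpa using h), if_neg h]
    by_cases hc : d.contains i = true
    · rw [if_pos hc]; rfl
    · rw [if_neg hc, PySem.Dict.getD_of_not_contains _ _ (by simpa using hc), zero_add]

-- B's counting loop builds the same counter
theorem pv_dictB_eq_counter (row : List Int) :
    row.foldl (fun d v => if v ≠ 0 then d.insert v (d.getD v 0 + 1) else d) PySem.Dict.empty
    = PySem.Dict.counter (row.filter (fun v => decide (v ≠ 0))) := by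
  rw [← PySem.Dict.foldl_insert_getD_add_one_eq_counter, List.foldl_filter]
  apply PySem.List.foldl_congr_mem
  intro d v _
  by_cases h : v = 0 <;> simp [h]

-- partitioning a mapped list into its filter buckets, over a duplicate-free list of all key values, is a permutation
theorem pv_flatMap_filter_perm {α β : Type} (cs : List Int) (vs : List α) (f : α → Int) (g : α → β)
    (hnd : cs.Nodup) (hmem : ∀ v ∈ vs, f v ∈ cs) :
    (cs.flatMap (fun c => ((vs.filter (fun v => decide (f v = c))).map g))).Perm (vs.map g) := by
  induction vs with
  | nil => simp
  | cons v vs ih =>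
    obtain ⟨cs1, cs2, rfl⟩ := List.append_of_mem (hmem v (List.mem_cons_self))
    have hnm : f v ∉ cs1 ++ cs2 := (List.nodup_cons.mp (List.nodup_middle.mp hnd)).1
    have hnotin1 : f v ∉ cs1 := fun h => hnm (List.mem_append_left _ h)
    have hnotin2 : f v ∉ cs2 := fun h => hnm (List.mem_append_right _ h)
    have hstep : ∀ c, c ≠ f v →
        ((v :: vs).filter (fun x => decide (f x = c))).map g
        = (vs.filter (fun x => decide (f x = c))).map g := by
      intro c hc
      rw [List.filter_cons_of_neg (by simpa using fun h => hc h.symm)]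
    have h1 : cs1.flatMap (fun c => ((v :: vs).filter (fun x => decide (f x = c))).map g)
        = cs1.flatMap (fun c => (vs.filter (fun x => decide (f x = c))).map g) :=
      List.flatMap_congr (fun c hc => hstep c (fun he => hnotin1 (he ▸ hc)))
    have h2 : cs2.flatMap (fun c => ((v :: vs).filter (fun x => decide (f x = c))).map g)
        = cs2.flatMap (fun c => (vs.filter (fun x => decide (f x = c))).map g) :=
      List.flatMap_congr (fun c hc => hstep c (fun he => hnotin2 (he ▸ hc)))
    have hmid : ((v :: vs).filter (fun x => decide (f x = f v))).map g
        = g v :: (vs.filter (fun x => decide (f x = f v))).map g := by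
      rw [List.filter_cons_of_pos (by simp)]
      simp
    have ihh := ih (fun w hw => hmem w (List.mem_cons_of_mem _ hw))
    have heq : ((cs1 ++ f v :: cs2).flatMap (fun c => ((v :: vs).filter (fun x => decide (f x = c))).map g))
        = cs1.flatMap (fun c => (vs.filter (fun x => decide (f x = c))).map g)
          ++ (g v :: (vs.filter (fun x => decide (f x = f v))).map g)
          ++ cs2.flatMap (fun c => (vs.filter (fun x => decide (f x = c))).map g) := by
      rw [List.flatMap_append, List.flatMap_cons, h1, h2, hmid, List.append_assoc]
    rw [heq, List.map_cons]
    have hp1 : (cs1.flatMap (fun c => (vs.filter (fun x => decide (f x = c))).map g)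
          ++ ((g v :: (vs.filter (fun x => decide (f x = f v))).map g)
          ++ cs2.flatMap (fun c => (vs.filter (fun x => decide (f x = c))).map g))).Perm
        (g v :: ((cs1 ++ f v :: cs2).flatMap (fun c => (vs.filter (fun x => decide (f x = c))).map g))) := by
      rw [List.flatMap_append, List.flatMap_cons]
      have := @List.perm_middle _ (g v)
        (cs1.flatMap (fun c => (vs.filter (fun x => decide (f x = c))).map g))
        ((vs.filter (fun x => decide (f x = f v))).map g
          ++ cs2.flatMap (fun c => (vs.filter (fun x => decide (f x = c))).map g))
      exact this
    rw [← List.append_assoc] at hp1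
    exact hp1.trans (ihh.cons (g v))

-- a guarded append loop is append of the flattened filter
theorem pv_foldl_guard {α : Type} (P : α → Prop) [DecidablePred P] (g : α → List Int) :
    ∀ (l : List α) (acc : List Int),
      l.foldl (fun a x => if P x then a ++ g x else a) acc
      = acc ++ (l.filter (fun x => decide (P x))).flatMap g := by
  intro l
  induction l with
  | nil => simp
  | cons x l ih =>
    intro acc
    by_cases h : P x <;> simp [h, ih, List.append_assoc]

-- the two row transforms agree
theorem pv_row_eq (row : List Int) : calRowA row = calRowB row := by
  simp only [calRowA, calRowB]
  rw [pv_dictA_eq_counter, pv_dictB_eq_counter, PySem.Dict.keys_counter]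
  set fr := row.filter (fun v => decide (v ≠ 0)) with hfr
  set cnt := PySem.Dict.counter fr with hcnt
  set S := PySem.List.sorted (PySem.Set.ofList fr) (fun x => x) with hS
  set C := PySem.List.sorted (PySem.Set.ofList cnt.values) (fun x => x) with hC
  have houter : C.foldl (fun acc c => S.foldl (fun acc2 v =>
        if cnt.getD v 0 = c then acc2 ++ [v, c] else acc2) acc) []
      = C.flatMap (fun c => (S.filter (fun v => decide (cnt.getD v 0 = c))).flatMap (fun v => [v, c])) := by
    rw [PySem.List.foldl_congr_mem C _
      (fun acc c => acc ++ (S.filter (fun v => decide (cnt.getD v 0 = c))).flatMap (fun v => [v, c])) []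
      (fun acc c _ => pv_foldl_guard (fun v => cnt.getD v 0 = c) (fun v => [v, c]) S acc)]
    rw [PySem.List.foldl_append_eq_flatMap]
    simp
  rw [houter, pv_sorted2_eq_sorted_lex, PySem.List.foldl_append_eq_flatMap, List.nil_append]
  have hkey : PySem.List.sorted cnt.items (fun p => toLex (p.2, p.1))
      = C.flatMap (fun c => (S.filter (fun v => decide (cnt.getD v 0 = c))).map (fun v => (v, c))) := by
    apply PySem.List.sorted_eq_of_perm_of_pairwise_lt
    · have hbucket : ∀ c, (S.filter (fun v => decide (cnt.getD v 0 = c))).map (fun v => (v, c))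
          = (S.filter (fun v => decide (cnt.getD v 0 = c))).map (fun v => (v, cnt.getD v 0)) := by
        intro c
        apply List.map_congr_left
        intro v hv
        have := (List.mem_filter.mp hv).2
        simp only [decide_eq_true_eq] at this
        rw [this]
      have hperm := pv_flatMap_filter_perm C S (fun v => cnt.getD v 0) (fun v => (v, cnt.getD v 0))
        ((PySem.List.sorted_perm _ _ _).nodup_iff.mpr (PySem.Set.nodup_ofList _))
        (by
          intro v hv
          rw [hS, PySem.List.mem_sorted] at hv
          rw [hC, PySem.List.mem_sorted, PySem.Set.mem_ofList]
          have hv' : v ∈ cnt.keys := by rw [hcnt, PySem.Dict.keys_counter]; exact hv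
          rw [PySem.Dict.values_eq_map_keys cnt (by rw [hcnt]; exact PySem.Dict.nodup_keys_counter fr) 0]
          exact List.mem_map_of_mem hv')
      rw [List.flatMap_congr (fun c _ => hbucket c)]
      refine hperm.trans ?_
      have hmapS : (S.map (fun v => (v, cnt.getD v 0))).Perm ((PySem.Set.ofList fr).map (fun v => (v, cnt.getD v 0))) :=
        (PySem.List.sorted_perm _ _ _).map _
      refine hmapS.trans ?_
      apply List.Perm.of_eq
      rw [hcnt, PySem.Dict.items_counter]
      apply List.map_congr_left
      intro k _
      rw [PySem.Dict.getD_counter]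
    · apply List.pairwise_flatMap.mpr
      constructor
      · intro c _
        apply List.pairwise_map.mpr
        have hSlt : S.Pairwise (· < ·) := PySem.List.sorted_ofList_pairwise_lt fr
        refine (hSlt.filter _).imp ?_
        intro a b h
        exact Prod.Lex.lt_iff.mpr (Or.inr ⟨rfl, h⟩)
      · have hClt : C.Pairwise (· < ·) := PySem.List.sorted_ofList_pairwise_lt _
        apply hClt.imp
        intro c c' hcc x hx y hy
        obtain ⟨v, _, rfl⟩ := List.mem_map.mp hx
        obtain ⟨w, _, rfl⟩ := List.mem_map.mp hy
        exact Prod.Lex.lt_iff.mpr (Or.inl hcc)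
  rw [hkey, List.flatMap_assoc]
  apply List.flatMap_congr
  intro c _
  rw [List.flatMap_map]

-- A's accumulating loop, in closed form
theorem pv_foldl_state (f : List Int → List Int) :
    ∀ (l : List (List Int)) (acc : List (List Int)) (m : Int),
      l.foldl (fun (st : List (List Int) × Int) row =>
        (st.1 ++ [f row], max st.2 (PySem.List.len (f row)))) (acc, m)
      = (acc ++ l.map f, (l.map f).foldl (fun m' r => max m' (PySem.List.len r)) m) := by
  intro l
  induction l with
  | nil => simp
  | cons row l ih =>
    intro acc m
    rw [List.foldl_cons, ih]
    simp

-- the running max of A equals B's max-with-default over the lengths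
theorem pv_max_eq (rows : List (List Int)) :
    rows.foldl (fun m r => max m (PySem.List.len r)) 0
    = PySem.List.maxD (rows.map PySem.List.len) (fun x => x) 0 := by
  cases rows with
  | nil => simp [PySem.List.maxD_nil]
  | cons r t =>
    rw [List.map_cons, PySem.List.maxD_id_cons, List.foldl_cons,
      max_eq_right (by simp [PySem.List.len_eq]), ← List.foldl_map]

-- the two padding/truncation steps agree when m dominates the row length
theorem pv_pad_eq (m : Int) (r : List Int) (h : PySem.List.len r ≤ m) :
    (let r1 := if PySem.List.len r ≠ m then r ++ List.replicate (m - PySem.List.len r).toNat 0 else r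
     if PySem.List.len r1 > 100 then PySem.List.slice r1 none (some 100) else r1)
    = PySem.List.slice (r ++ List.replicate (m - PySem.List.len r).toNat 0) none (some 100) := by
  rw [PySem.List.slice_to _ (by norm_num)]
  have h100 : ((100 : Int)).toNat = 100 := rfl
  by_cases he : PySem.List.len r = m
  · have hrep : (m - PySem.List.len r).toNat = 0 := by omega
    rw [if_neg (not_not_intro he), hrep, List.replicate_zero, List.append_nil]
    by_cases hb : PySem.List.len r > 100
    · rw [if_pos hb, PySem.List.slice_to _ (by norm_num)]
    · rw [if_neg hb, h100]
      exact (List.take_of_length_le (by simp only [PySem.List.len_eq] at hb; omega)).symm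
  · rw [if_pos he]
    have hlen : PySem.List.len (r ++ List.replicate (m - PySem.List.len r).toNat 0) = m := by
      simp only [PySem.List.len_eq, List.length_append, List.length_replicate]
      simp only [PySem.List.len_eq] at h ⊢
      omega
    by_cases hb : m > 100
    · rw [if_pos (by rw [hlen]; exact hb), PySem.List.slice_to _ (by norm_num)]
    · rw [if_neg (by rw [hlen]; exact hb), h100]
      exact (List.take_of_length_le (by
        simp only [PySem.List.len_eq] at hlen hb ⊢
        omega)).symm

theorem pv_spec (board : List (List Int)) : cal_sort board = cal_sort_alt board := by
  simp only [cal_sort, cal_sort_alt]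
  rw [pv_foldl_state calRowA board [] 0, List.map_congr_left (fun r _ => pv_row_eq r)]
  set rows := board.map calRowB with hrows
  simp only [List.nil_append]
  rw [pv_max_eq rows]
  apply List.map_congr_left
  intro r hr
  have hle : PySem.List.len r ≤ rows.foldl (fun m r => max m (PySem.List.len r)) 0 :=
    (PySem.List.le_foldl_max_int rows PySem.List.len 0).2 r hr
  rw [pv_max_eq rows] at hle
  exact pv_pad_eq _ r hle

-- ===== VERDICT (by name: the statement is the Claim_ definition above) =====
theorem cal_sort_spec : Claim_equal_cal_sort := by
  intro board _
  show cal_sort board = cal_sort_alt board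
  exact pv_spec board
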